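-- pv_equiv track=rewrite | github.com/nmpogg/CodePTIT | python/KiemTraSoDep.py | check
-- ===== SOURCE A (Python) =====
-- def check(s):
--     a = []
--     for i in range(len(s)):
--         if(s[i] not in a):
--             a.append(s[i])
--             if len(a) > 2: return False
--     for i in range(len(s)- 2):
--         if s[i] != s[i+2]: return False
--     return True
-- ===== SOURCE B (Python) =====
-- def check(s):
--     # period-2 test as a single constructed-value comparison; it subsumes A's
--     # distinct-character scan (an alternating string has at most 2 distinct chars)
--     return s == (s[:2] * (len(s) // 2 + 1))[:len(s)]
-- ===== Notes on version B (the rewrite author's own statement) =====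
-- stated objective: simpler
-- what changed: Replaced A's two scanning loops (distinct-character accumulator plus index-wise period check) with one closed-form comparison of s against its first-two-characters prefix repeated and truncated; the distinct-character pass is dropped since period-2 implies at most two distinct characters.
import Mathlib
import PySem

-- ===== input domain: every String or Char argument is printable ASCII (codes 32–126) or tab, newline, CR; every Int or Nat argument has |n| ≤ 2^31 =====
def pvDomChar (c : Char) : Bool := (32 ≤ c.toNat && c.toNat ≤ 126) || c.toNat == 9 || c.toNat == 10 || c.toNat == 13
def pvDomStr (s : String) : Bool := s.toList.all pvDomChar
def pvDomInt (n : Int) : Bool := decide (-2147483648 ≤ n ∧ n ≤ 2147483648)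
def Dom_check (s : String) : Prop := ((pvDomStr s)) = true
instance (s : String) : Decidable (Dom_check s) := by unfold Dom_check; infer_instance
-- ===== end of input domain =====

-- B replaces A's two scanning loops by one closed-form comparison of s with its
-- first-two-characters prefix repeated and truncated (objective: simpler).

-- ===== PORT A =====
-- A's first loop: collect unseen characters into `a`, return False once a third distinct one appears
def checkLoop1 : List Char → List Char → Bool
  | [], _ => true
  | c :: t, a =>
    if a.contains c then checkLoop1 t a
    else if a.length + 1 > 2 then false
    else checkLoop1 t (a ++ [c])

-- A's second loop over i ∈ range(len(s)-2): every index used satisfies 0 ≤ i and i+2 < len(s),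
-- so Nat indexing with getD is exact for Python's s[i] / s[i+2] here (the default is never read)
def checkLoop2 (l : List Char) : List Nat → Bool
  | [] => true
  | i :: is => if l.getD i ' ' ≠ l.getD (i+2) ' ' then false else checkLoop2 l is

def checkList (l : List Char) : Bool :=
  if checkLoop1 l [] then checkLoop2 l (List.range (l.length - 2)) else false

def check (s : String) : Bool := checkList s.toList

-- ===== PORT B =====
-- s[:2] * (len(s)//2 + 1) then [:len(s)]; len(s) ≥ 0 so Python's // is Nat division here
def checkAltList (l : List Char) : Bool :=
  l == (List.replicate (l.length / 2 + 1) (l.take 2)).flatten.take l.length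

def check_alt (s : String) : Bool := checkAltList s.toList

-- ===== PRECONDITION & SPEC =====
def Spec_check (s : String) (out : Bool) : Prop := out = check_alt s
instance (s : String) (out : Bool) : Decidable (Spec_check s out) := by unfold Spec_check; infer_instance

-- ===== CLAIM (what is proved, stated in full; the proofs are below) =====
def Claim_equal_check : Prop := ∀ (s : String), Dom_check s → Spec_check s (check s)

-- ===== LEMMAS AND PROOFS =====

-- the period-2 property both programs decide
def Per2 (l : List Char) : Prop := ∀ i, i + 2 < l.length → l.getD i ' ' = l.getD (i + 2) ' '

def altList : Char → Char → Nat → List Char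
  | _, _, 0 => []
  | a, b, n + 1 => a :: altList b a n

theorem altList_length (a b : Char) (n : Nat) : (altList a b n).length = n := by
  induction n generalizing a b with
  | zero => rfl
  | succ n ih => simp [altList, ih]

theorem altList_getD (n : Nat) : ∀ (a b : Char) (i : Nat), i < n →
    (altList a b n).getD i ' ' = if i % 2 = 0 then a else b := by
  induction n with
  | zero => intro a b i h; omega
  | succ n ih =>
    intro a b i h
    match i with
    | 0 => rfl
    | j + 1 =>
      have hj : j < n := by omega
      have := ih b a j hj
      simp only [altList, List.getD_cons_succ, this]
      rcases Nat.even_or_odd j with he | ho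
      · have h1 : j % 2 = 0 := Nat.even_iff.mp he
        have h2 : (j + 1) % 2 ≠ 0 := by omega
        simp [h1, h2]
      · have h1 : j % 2 ≠ 0 := by have := Nat.odd_iff.mp ho; omega
        have h2 : (j + 1) % 2 = 0 := by have := Nat.odd_iff.mp ho; omega
        simp [h1, h2]

theorem flatten_replicate_take (k : Nat) : ∀ (n : Nat) (a b : Char), n ≤ 2 * k →
    (List.replicate k [a, b]).flatten.take n = altList a b n := by
  induction k with
  | zero => intro n a b h; interval_cases n; rfl
  | succ k ih =>
    intro n a b h
    match n with
    | 0 => rfl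
    | 1 => simp [List.replicate_succ, altList]
    | m + 2 =>
      have hm : m ≤ 2 * k := by omega
      simp only [List.replicate_succ, List.flatten_cons, List.cons_append, List.nil_append,
        List.take_succ_cons, ih m a b hm]
      rfl

theorem per2_pattern {l : List Char} (h : Per2 l) :
    ∀ i, i < l.length → l.getD i ' ' = if i % 2 = 0 then l.getD 0 ' ' else l.getD 1 ' ' := by
  intro i
  induction i using Nat.strong_induction_on with
  | _ i ih =>
    intro hi
    match i with
    | 0 => simp
    | 1 => simp
    | j + 2 =>
      have h1 := h j (by omega)
      have h2 := ih j (by omega) (by omega)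
      have h3 : (j + 2) % 2 = j % 2 := by omega
      rw [← h1, h2, h3]

theorem loop2_range_iff (l : List Char) (is : List Nat) :
    checkLoop2 l is = true ↔ ∀ i ∈ is, l.getD i ' ' = l.getD (i + 2) ' ' := by
  induction is with
  | nil => simp [checkLoop2]
  | cons i is ih =>
    simp only [checkLoop2]
    split_ifs with h
    · constructor
      · intro hf; exact absurd hf (by simp)
      · intro hall; exact absurd (hall i (List.mem_cons_self ..)) h
    · rw [not_not] at h
      constructor
      · intro h2 j hj
        rcases List.mem_cons.mp hj with rfl | hj
        · exact h
        · exact ih.mp h2 j hj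
      · intro hall
        exact ih.mpr (fun j hj => hall j (List.mem_cons_of_mem _ hj))

theorem loop1_true : ∀ (l acc : List Char) (x y : Char),
    (∀ c ∈ l, c = x ∨ c = y) → acc.Nodup → (∀ c ∈ acc, c = x ∨ c = y) →
    checkLoop1 l acc = true := by
  intro l
  induction l with
  | nil => intro acc x y _ _ _; rfl
  | cons c t ih =>
    intro acc x y hl hnd hacc
    simp only [checkLoop1]
    by_cases hc : c ∈ acc
    · rw [if_pos (by simpa using hc)]
      exact ih acc x y (fun d hd => hl d (List.mem_cons_of_mem _ hd)) hnd hacc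
    · rw [if_neg (by simpa using hc)]
      have hcxy : c = x ∨ c = y := hl c (List.mem_cons_self ..)
      have hlen : acc.length ≤ 1 := by
        match acc, hnd with
        | [], _ => simp
        | [e], _ => simp
        | e1 :: e2 :: tt, hnd =>
          exfalso
          have he1 := hacc e1 (by simp)
          have he2 := hacc e2 (by simp)
          have hne : e1 ≠ e2 := by
            have := List.nodup_cons.mp hnd
            intro hh; exact this.1 (hh ▸ List.mem_cons_self ..)
          rcases hcxy with rfl | rfl
          · rcases he1 with rfl | rfl
            · exact hc (by simp)
            · rcases he2 with rfl | rfl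
              · exact hc (by simp)
              · exact hne rfl
          · rcases he1 with rfl | rfl
            · rcases he2 with rfl | rfl
              · exact hne rfl
              · exact hc (by simp)
            · exact hc (by simp)
      rw [if_neg (by omega)]
      refine ih (acc ++ [c]) x y (fun d hd => hl d (List.mem_cons_of_mem _ hd)) ?_ ?_
      · simp [List.nodup_append, hnd]
        intro a ha hac
        exact hc (hac ▸ ha)
      · intro d hd
        rcases List.mem_append.mp hd with hd | hd
        · exact hacc d hd
        · simp at hd; subst hd; exact hcxy

theorem checkList_iff (l : List Char) : checkList l = true ↔ Per2 l := by
  constructor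
  · intro h
    unfold checkList at h
    split_ifs at h with h1
    intro i hi
    exact (loop2_range_iff l _).mp h i (List.mem_range.mpr (by omega))
  · intro h
    unfold checkList
    have hx : checkLoop1 l [] = true := by
      refine loop1_true l [] (l.getD 0 ' ') (l.getD 1 ' ') ?_ (by simp) (by simp)
      intro c hcm
      obtain ⟨i, hi, rfl⟩ := List.mem_iff_getElem.mp hcm
      have hg : l.getD i ' ' = l[i] := List.getD_eq_getElem l ' ' hi
      have := per2_pattern h i hi
      rw [hg] at this
      rw [this]
      split_ifs <;> [left; right] <;> rfl
    rw [if_pos hx]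
    exact (loop2_range_iff l _).mpr (fun i hi => h i (by have := List.mem_range.mp hi; omega))

theorem altList_eq_iff {l : List Char} {a b : Char} {t : List Char} (hl : l = a :: b :: t) :
    l = altList a b l.length ↔ Per2 l := by
  constructor
  · intro h i hi
    have h0 : ∀ j, j < l.length → l.getD j ' ' = if j % 2 = 0 then a else b := by
      intro j hj
      conv_lhs => rw [h]
      exact altList_getD l.length a b j hj
    rw [h0 i (by omega), h0 (i + 2) hi]
    have h3 : (i + 2) % 2 = i % 2 := by omega
    rw [h3]
  · intro h
    apply List.ext_getElem (by rw [altList_length])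
    intro i hi hi2
    have hg : l[i] = l.getD i ' ' := (List.getD_eq_getElem l ' ' hi).symm
    have hg2 : (altList a b l.length)[i] = (altList a b l.length).getD i ' ' :=
      (List.getD_eq_getElem _ ' ' hi2).symm
    rw [hg, hg2, altList_getD l.length a b i hi, per2_pattern h i hi]
    have ha : l.getD 0 ' ' = a := by rw [hl]; rfl
    have hb : l.getD 1 ' ' = b := by rw [hl]; rfl
    rw [ha, hb]

theorem checkAltList_iff (l : List Char) : checkAltList l = true ↔ Per2 l := by
  match l with
  | [] => simp [checkAltList, Per2]
  | [c] =>
    constructor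
    · intro _ i hi
      simp only [List.length_cons, List.length_nil] at hi
      omega
    · intro _
      simp [checkAltList]
  | a :: b :: t =>
    have htake : (a :: b :: t).take 2 = [a, b] := rfl
    have hle : (a :: b :: t).length ≤ 2 * ((a :: b :: t).length / 2 + 1) := by omega
    unfold checkAltList
    rw [htake, flatten_replicate_take _ _ a b hle, beq_iff_eq]
    exact altList_eq_iff rfl

-- ===== VERDICT (by name: the statement is the Claim_ definition above) =====
theorem check_spec : Claim_equal_check := by
  intro s _
  unfold Spec_check check check_alt
  exact Bool.eq_iff_iff.mpr ((checkList_iff _).trans (checkAltList_iff _).symm)
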